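-- pv_equiv track=rewrite | github.com/Abrorxon-abi/python_course | two_exercises.py | find_prime_with_most_consecutive_sums
-- ===== SOURCE A (Python) =====
-- def generate_primes(limit):
--     primes = [2]
--     current_num = 3
--
--     while current_num < limit:
--         is_prime = True
--         for prime in primes:
--             if prime * prime > current_num:
--                 break
--             if current_num % prime == 0:
--                 is_prime = False
--                 break
--         if is_prime:
--             primes.append(current_num)
--         current_num += 2
--
--     return primes
--
-- def find_prime_with_most_consecutive_sums(limit):
--     primes = generate_primes(limit)
--     max_consecutive = 0
--     result = 0
--
--     for i in range(len(primes)):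
--         consecutive = 0
--         prime_sum = 0
--         for j in range(i, len(primes)):
--             prime_sum += primes[j]
--             if prime_sum > limit:
--                 break
--             consecutive += 1
--             if prime_sum in primes and consecutive > max_consecutive:
--                 max_consecutive = consecutive
--                 result = prime_sum
--     return result
-- ===== SOURCE B (Python) =====
-- def generate_primes(limit):
--     primes = [2]
--     current_num = 3
--     while current_num < limit:
--         is_prime = True
--         for prime in primes:
--             if prime * prime > current_num:
--                 break
--             if current_num % prime == 0:
--                 is_prime = False
--                 break
--         if is_prime:
--             primes.append(current_num)
--         current_num += 2
--     return primes
--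
--
-- def find_prime_with_most_consecutive_sums(limit):
--     primes = generate_primes(limit)
--     n = len(primes)
--     prefix = [0]
--     for p in primes:
--         prefix.append(prefix[-1] + p)
--     prime_set = set(primes)
--     best_len = 0
--     result = 0
--     j = 0
--     for i in range(n):
--         if j < i:
--             j = i
--         while j < n and prefix[j + 1] - prefix[i] <= limit:
--             j += 1
--         for length in range(j - i, 0, -1):
--             s = prefix[i + length] - prefix[i]
--             if s <= limit and s in prime_set:
--                 if length > best_len:
--                     best_len = length
--                     result = s
--                 break
--     return result
-- ===== Notes on version B (the rewrite author's own statement) =====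
-- stated objective: faster
-- what changed: B precomputes prefix sums and a prime set, bounds the feasible window length per start with a monotone two-pointer sweep, then scans window lengths downward stopping at the first qualifying window, replacing A's per-start forward running-sum scan with an O(n) list-membership test inside the inner loop.
import Mathlib
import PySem

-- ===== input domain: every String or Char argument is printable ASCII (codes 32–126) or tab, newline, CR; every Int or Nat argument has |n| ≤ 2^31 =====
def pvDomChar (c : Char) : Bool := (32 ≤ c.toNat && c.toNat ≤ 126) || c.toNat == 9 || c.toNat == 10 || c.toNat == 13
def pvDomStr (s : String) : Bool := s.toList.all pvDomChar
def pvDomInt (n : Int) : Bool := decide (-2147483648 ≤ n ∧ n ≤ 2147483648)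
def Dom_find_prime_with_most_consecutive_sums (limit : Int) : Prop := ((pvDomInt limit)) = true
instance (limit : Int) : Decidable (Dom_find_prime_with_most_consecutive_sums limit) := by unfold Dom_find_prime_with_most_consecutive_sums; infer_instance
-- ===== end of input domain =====

-- B replaces A's inner forward scan with list membership (O(n) per window) by prefix sums, a prime
-- set, a two-pointer bound on the feasible window length per start, and a descending-length scan
-- that stops at the first hit (objective: faster; measured faster in a timing run).

-- ===== PORT A =====

-- 'for prime in primes: if prime*prime > current_num: break; if current_num % prime == 0: is_prime=False; break'
def pvTrial (c : Int) : List Int → Bool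
  | [] => true
  | p :: ps => if p * p > c then true else if PySem.Int.mod c p = 0 then false else pvTrial c ps

-- 'while current_num < limit: …; current_num += 2'
def pvGenAux (limit : Int) (primes : List Int) (cur : Int) : List Int :=
  if h : cur < limit then
    pvGenAux limit (if pvTrial cur primes then primes ++ [cur] else primes) (cur + 2)
  else primes
termination_by (limit - cur).toNat
decreasing_by omega

def generate_primes (limit : Int) : List Int := pvGenAux limit [2] 3

-- inner loop 'for j in range(i, len(primes))' iterates over the suffix primes[i:]
def pvInnerA (limit : Int) (primes : List Int) : List Int → Int → Int → Int → Int → Int × Int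
  | [], _cons, _s, m, r => (m, r)
  | p :: rest, cons, s, m, r =>
    let s' := s + p
    if s' > limit then (m, r)
    else if s' ∈ primes ∧ cons + 1 > m then pvInnerA limit primes rest (cons + 1) s' (cons + 1) s'
    else pvInnerA limit primes rest (cons + 1) s' m r

-- outer loop 'for i in range(len(primes))': one iteration per suffix of primes
def pvOuterA (limit : Int) (primes : List Int) : List Int → Int × Int → Int × Int
  | [], st => st
  | p :: rest, st => pvOuterA limit primes rest (pvInnerA limit primes (p :: rest) 0 0 st.1 st.2)

def find_prime_with_most_consecutive_sums (limit : Int) : Int :=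
  let primes := generate_primes limit
  (pvOuterA limit primes primes (0, 0)).2

-- ===== PORT B =====

-- 'prefix = [0]; for p in primes: prefix.append(prefix[-1] + p)'  (prefix[-1]: pyGet? -1; list nonempty, so getD is never taken)
def pvPrefix (primes : List Int) : List Int :=
  primes.foldl (fun pre p => pre ++ [(PySem.List.pyGet? pre (-1)).getD 0 + p]) [0]

-- 'for length in range(n - i, 0, -1): s = prefix[i+length] - prefix[i]; if s <= limit and s in prime_set: …; break'
-- (indices are always in range, so getD's default is never taken)
def pvDownB (limit : Int) (pset : PySem.Set Int) (pre : List Int) (i : Nat) : Nat → Int × Int → Int × Int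
  | 0, st => st
  | L + 1, (best, res) =>
    let s := pre.getD (i + (L + 1)) 0 - pre.getD i 0
    if s ≤ limit ∧ PySem.Set.contains pset s then
      (if (L : Int) + 1 > best then ((L : Int) + 1, s) else (best, res))
    else pvDownB limit pset pre i L (best, res)

-- 'while j < n and prefix[j + 1] - prefix[i] <= limit: j += 1'
def pvWhileB (limit : Int) (pre : List Int) (n : Nat) (i : Nat) (j : Nat) : Nat :=
  if h : j < n ∧ pre.getD (j + 1) 0 - pre.getD i 0 ≤ limit then pvWhileB limit pre n i (j + 1) else j
termination_by n - j
decreasing_by omega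

-- 'for i in range(n): if j < i: j = i; while …; for length in range(j - i, 0, -1): …'
def pvOuterB (limit : Int) (pset : PySem.Set Int) (pre : List Int) (n : Nat) :
    List Nat → Nat → Int × Int → Int × Int
  | [], _, st => st
  | i :: is, j, st =>
    let j0 := if j < i then i else j
    let jw := pvWhileB limit pre n i j0
    pvOuterB limit pset pre n is jw (pvDownB limit pset pre i (jw - i) st)

def find_prime_with_most_consecutive_sums_alt (limit : Int) : Int :=
  let primes := generate_primes limit
  let n := primes.length
  let pre := pvPrefix primes
  let pset := PySem.Set.ofList primes
  (pvOuterB limit pset pre n (List.range n) 0 (0, 0)).2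

-- ===== PRECONDITION & SPEC =====
def Spec_find_prime_with_most_consecutive_sums (limit : Int) (out : Int) : Prop := out = find_prime_with_most_consecutive_sums_alt limit
instance (limit : Int) (out : Int) : Decidable (Spec_find_prime_with_most_consecutive_sums limit out) := by unfold Spec_find_prime_with_most_consecutive_sums; infer_instance

-- ===== CLAIM (what is proved, stated in full; the proofs are below) =====
def Claim_equal_find_prime_with_most_consecutive_sums : Prop := ∀ (limit : Int), Dom_find_prime_with_most_consecutive_sums limit → Spec_find_prime_with_most_consecutive_sums limit (find_prime_with_most_consecutive_sums limit)

-- ===== LEMMAS AND PROOFS =====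

-- proof-side reference: the longest window of `suf` whose running sum (from base `s`) is ≤ limit
-- and a member of `primes`, together with that sum ("last good prefix of suf")
def pvDown (limit : Int) (primes : List Int) : List Int → Int → Option (Int × Int)
  | [], _ => none
  | p :: rest, s =>
    match pvDown limit primes rest (s + p) with
    | some (k, v) => some (k + 1, v)
    | none => if s + p ≤ limit ∧ (s + p) ∈ primes then some (1, s + p) else none

theorem pvDown_pos {limit : Int} {primes suf : List Int} {s k v : Int}
    (h : pvDown limit primes suf s = some (k, v)) : 1 ≤ k := by
  induction suf generalizing s k v with
  | nil => simp [pvDown] at h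
  | cons p rest ih =>
    rw [show pvDown limit primes (p :: rest) s =
      (match pvDown limit primes rest (s + p) with
       | some (k, v) => some (k + 1, v)
       | none => if s + p ≤ limit ∧ (s + p) ∈ primes then some (1, s + p) else none) from rfl] at h
    cases hd : pvDown limit primes rest (s + p) with
    | some kv =>
      obtain ⟨k', v'⟩ := kv
      rw [hd] at h
      simp only [Option.some.injEq, Prod.mk.injEq] at h
      have := ih hd
      omega
    | none =>
      rw [hd] at h
      by_cases hc : s + p ≤ limit ∧ (s + p) ∈ primes
      · rw [if_pos hc] at h
        have hk := congrArg Prod.fst (Option.some.inj h)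
        simp at hk
        omega
      · rw [if_neg hc] at h
        cases h

theorem pvDown_none_of_gt {limit : Int} {primes : List Int} : ∀ {suf : List Int} {s : Int},
    (∀ p ∈ suf, 1 ≤ p) → limit < s → pvDown limit primes suf s = none := by
  intro suf
  induction suf with
  | nil => intro s _ _; rfl
  | cons p rest ih =>
    intro s hpos hgt
    have hp : 1 ≤ p := hpos p (by simp)
    have hrest : ∀ q ∈ rest, 1 ≤ q := fun q hq => hpos q (by simp [hq])
    rw [show pvDown limit primes (p :: rest) s =
      (match pvDown limit primes rest (s + p) with
       | some (k, v) => some (k + 1, v)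
       | none => if s + p ≤ limit ∧ (s + p) ∈ primes then some (1, s + p) else none) from rfl]
    rw [ih (s := s + p) hrest (by omega)]
    have hng : ¬ (s + p ≤ limit ∧ (s + p) ∈ primes) := by intro ⟨h1, _⟩; omega
    simp [hng]

theorem pvInnerA_eq_down (limit : Int) (primes : List Int) :
    ∀ (suf : List Int) (cons s m r : Int), (∀ p ∈ suf, 1 ≤ p) →
    pvInnerA limit primes suf cons s m r =
      match pvDown limit primes suf s with
      | some (k, v) => if cons + k > m then (cons + k, v) else (m, r)
      | none => (m, r) := by
  intro suf
  induction suf with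
  | nil => intro cons s m r _; rfl
  | cons p rest ih =>
    intro cons s m r hpos
    have hrest : ∀ q ∈ rest, 1 ≤ q := fun q hq => hpos q (by simp [hq])
    have hunf : pvDown limit primes (p :: rest) s =
      (match pvDown limit primes rest (s + p) with
       | some (k, v) => some (k + 1, v)
       | none => if s + p ≤ limit ∧ (s + p) ∈ primes then some (1, s + p) else none) := rfl
    by_cases hgt : s + p > limit
    · have hd : pvDown limit primes (p :: rest) s = none := by
        rw [hunf, pvDown_none_of_gt (s := s + p) hrest (by have := hpos p (by simp); omega)]
        have hng : ¬ (s + p ≤ limit ∧ (s + p) ∈ primes) := by intro ⟨h1, _⟩; omega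
        simp [hng]
      rw [hd]
      simp only [pvInnerA]
      simp [hgt]
    · by_cases hup : (s + p) ∈ primes ∧ cons + 1 > m
      · have hstep : pvInnerA limit primes (p :: rest) cons s m r
            = pvInnerA limit primes rest (cons + 1) (s + p) (cons + 1) (s + p) := by
          simp only [pvInnerA]
          simp [hgt, hup]
        rw [hstep, ih _ _ _ _ hrest, hunf]
        cases hd : pvDown limit primes rest (s + p) with
        | some kv =>
          obtain ⟨k, v⟩ := kv
          have hk := pvDown_pos hd
          have h1 : cons + 1 + k > cons + 1 := by omega
          have h2 : cons + (k + 1) > m := by omega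
          have h3 : cons + 1 + k = cons + (k + 1) := by omega
          simp [h2, h3]
          intro h0
          exact absurd h0 (by omega)
        | none =>
          have hgood : (s + p ≤ limit ∧ (s + p) ∈ primes) := ⟨by omega, hup.1⟩
          simp [hgood, hup.2]
      · have hstep : pvInnerA limit primes (p :: rest) cons s m r
            = pvInnerA limit primes rest (cons + 1) (s + p) m r := by
          simp only [pvInnerA]
          simp [hgt]
          intro hc hm
          exact absurd ⟨hc, by omega⟩ hup
        rw [hstep, ih _ _ _ _ hrest, hunf]
        cases hd : pvDown limit primes rest (s + p) with
        | some kv =>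
          obtain ⟨k, v⟩ := kv
          have h3 : cons + 1 + k = cons + (k + 1) := by omega
          simp [h3]
        | none =>
          by_cases hc : (s + p) ∈ primes
          · have hnm : ¬ (cons + 1 > m) := fun h => hup ⟨hc, h⟩
            have hgood : (s + p ≤ limit ∧ (s + p) ∈ primes) := ⟨by omega, hc⟩
            simp [hgood, hnm]
          · have hng : ¬ (s + p ≤ limit ∧ (s + p) ∈ primes) := by intro ⟨_, h⟩; exact hc h
            simp [hng]

-- snoc characterization of pvDown
theorem pvDown_snoc (limit : Int) (primes : List Int) :
    ∀ (xs : List Int) (x s : Int),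
    pvDown limit primes (xs ++ [x]) s =
      (if s + xs.sum + x ≤ limit ∧ (s + xs.sum + x) ∈ primes
       then some ((xs.length : Int) + 1, s + xs.sum + x)
       else pvDown limit primes xs s) := by
  intro xs
  induction xs with
  | nil => intro x s; simp [pvDown]
  | cons p xs ih =>
    intro x s
    simp only [List.cons_append, pvDown, ih]
    by_cases hg : s + p + xs.sum + x ≤ limit ∧ (s + p + xs.sum + x) ∈ primes
    · have hg' : s + (p :: xs).sum + x ≤ limit ∧ (s + (p :: xs).sum + x) ∈ primes := by
        simpa [add_assoc] using hg
      simp only [if_pos hg, if_pos hg']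
      simp [add_assoc]
    · have hg' : ¬ (s + (p :: xs).sum + x ≤ limit ∧ (s + (p :: xs).sum + x) ∈ primes) := by
        simpa [add_assoc] using hg
      simp only [if_neg hg, if_neg hg']

theorem generate_primes_pos (limit : Int) : ∀ p ∈ generate_primes limit, 1 ≤ p := by
  have : ∀ (primes : List Int) (cur : Int), (∀ p ∈ primes, 1 ≤ p) → 1 ≤ cur →
      ∀ p ∈ pvGenAux limit primes cur, 1 ≤ p := by
    intro primes cur
    fun_induction pvGenAux limit primes cur with
    | case1 primes cur h ih =>
      intro hpr hcur
      apply ih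
      · intro p hp
        split at hp
        · rcases List.mem_append.mp hp with h' | h'
          · exact hpr p h'
          · simp at h'; omega
        · exact hpr p hp
      · omega
    | case2 primes cur h => intro hpr _; exact hpr
  intro p hp
  exact this [2] 3 (by intro q hq; simp at hq; omega) (by norm_num) p hp

theorem pvPrefix_eq (primes : List Int) :
    pvPrefix primes = (List.range (primes.length + 1)).map (fun k => (primes.take k).sum) := by
  induction primes using List.reverseRecOn with
  | nil => simp [pvPrefix]
  | append_singleton xs x ih =>
    unfold pvPrefix at ih ⊢
    rw [List.foldl_append, ih]
    simp only [List.foldl_cons, List.foldl_nil]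
    have hlast : (PySem.List.pyGet?
        ((List.range (xs.length + 1)).map (fun k => (xs.take k).sum)) (-1)).getD 0 = xs.sum := by
      rw [List.range_succ]
      simp [PySem.List.pyGet?, PySem.List.pyIdx?]
    rw [hlast]
    have hlen : (xs ++ [x]).length + 1 = (xs.length + 1) + 1 := by simp
    rw [hlen, List.range_succ (n := xs.length + 1), List.map_append]
    congr 1
    · apply List.map_congr_left
      intro k hk
      have hk' : k ≤ xs.length := by simp at hk; omega
      rw [List.take_append_of_le_length hk']
    · have : (xs ++ [x]).take (xs.length + 1) = xs ++ [x] := List.take_of_length_le (by simp)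
      simp [this]

-- the B inner loop computes pvDown on the corresponding suffix
theorem pvDownB_eq (limit : Int) (primes : List Int) (i : Nat) :
    ∀ (L : Nat) (st : Int × Int), i + L ≤ primes.length →
    pvDownB limit (PySem.Set.ofList primes) (pvPrefix primes) i L st =
      match pvDown limit primes ((primes.drop i).take L) 0 with
      | some (k, v) => if k > st.1 then (k, v) else st
      | none => st := by
  intro L
  induction L with
  | zero => intro st _; simp [pvDownB, pvDown]
  | succ L ih =>
    intro st hle
    obtain ⟨best, res⟩ := st
    have hpre : ∀ k, k ≤ primes.length → (pvPrefix primes).getD k 0 = (primes.take k).sum := by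
      intro k hk
      rw [pvPrefix_eq]
      rw [List.getD_eq_getElem?_getD, List.getElem?_map]
      rw [List.getElem?_range (by omega)]
      simp
    have hidx : i + L < primes.length := by omega
    have htake : (primes.drop i).take (L + 1) = (primes.drop i).take L ++ [primes[i + L]] := by
      rw [List.take_add_one]
      congr 1
      rw [List.getElem?_drop]
      simp [List.getElem?_eq_getElem hidx]
    have hsum : ((primes.drop i).take L).sum = (primes.take (i + L)).sum - (primes.take i).sum := by
      have : primes.take (i + L) = primes.take i ++ (primes.drop i).take L := List.take_add ..
      rw [this, List.sum_append]; ring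
    have hsum1 : (primes.take (i + L + 1)).sum = (primes.take (i + L)).sum + primes[i + L] := by
      rw [List.take_add_one, List.sum_append, List.getElem?_eq_getElem hidx]
      simp
    have hs : (pvPrefix primes).getD (i + (L + 1)) 0 - (pvPrefix primes).getD i 0
        = 0 + ((primes.drop i).take L).sum + primes[i + L] := by
      rw [hpre _ (by omega), hpre _ (by omega)]
      have : i + (L + 1) = i + L + 1 := by omega
      rw [this, hsum1, hsum]; ring
    have hcont : ∀ v : Int, PySem.Set.contains (PySem.Set.ofList primes) v = primes.contains v := by
      intro v
      simp [PySem.Set.contains, PySem.Set.mem_ofList]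
    simp only [pvDownB, htake, pvDown_snoc]
    rw [hs]
    set X : Int := 0 + ((primes.drop i).take L).sum + primes[i + L] with hX
    by_cases hg : X ≤ limit ∧ X ∈ primes
    · have hg' : X ≤ limit ∧ (PySem.Set.ofList primes).contains X = true := by
        refine ⟨hg.1, ?_⟩
        rw [hcont]
        simpa using hg.2
      rw [if_pos hg', if_pos hg]
      have hlen : (((primes.drop i).take L).length : Int) = (L : Int) := by
        simp [List.length_take, List.length_drop]
        omega
      rw [hlen]
    · have hg' : ¬ (X ≤ limit ∧ (PySem.Set.ofList primes).contains X = true) := by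
        intro ⟨h1, h2⟩
        rw [hcont] at h2
        exact hg ⟨h1, by simpa using h2⟩
      rw [if_neg hg', if_neg hg]
      exact ih (best, res) (by omega)

-- pvDown ignores a tail all of whose window sums exceed limit
theorem pvDown_take_eq (limit : Int) (primes : List Int) (suf : List Int) (s : Int) (t : Nat)
    (hfail : ∀ k, t < k → k ≤ suf.length → ¬ (s + (suf.take k).sum ≤ limit)) :
    pvDown limit primes suf s = pvDown limit primes (suf.take t) s := by
  have chain : ∀ m, pvDown limit primes (suf.take (t + m)) s = pvDown limit primes (suf.take t) s := by
    intro m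
    induction m with
    | zero => rfl
    | succ m ihm =>
      by_cases hlt : t + m < suf.length
      · have htk : suf.take (t + m + 1) = suf.take (t + m) ++ [suf[t + m]] := by
          rw [List.take_add_one]
          congr 1
          simp [List.getElem?_eq_getElem hlt]
        have hss : s + (suf.take (t + m)).sum + suf[t + m] = s + (suf.take (t + m + 1)).sum := by
          rw [htk, List.sum_append]
          simp [add_assoc]
        have hng : ¬ (s + (suf.take (t + m)).sum + suf[t + m] ≤ limit ∧
            (s + (suf.take (t + m)).sum + suf[t + m]) ∈ primes) := by
          intro ⟨h1, _⟩
          exact hfail (t + m + 1) (by omega) (by omega) (by omega)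
        have : t + (m + 1) = t + m + 1 := by omega
        rw [this, htk, pvDown_snoc, if_neg hng, ihm]
      · have h1 : suf.take (t + (m + 1)) = suf := List.take_of_length_le (by omega)
        have h2 : suf.take (t + m) = suf := List.take_of_length_le (by omega)
        rw [h1, ← ihm, h2]
  by_cases hts : t ≤ suf.length
  · have := chain (suf.length - t)
    rwa [show t + (suf.length - t) = suf.length from by omega, List.take_length] at this
  · rw [List.take_of_length_le (by omega)]

theorem pvWhileB_ge (limit : Int) (pre : List Int) (n i : Nat) :
    ∀ j, j ≤ pvWhileB limit pre n i j := by
  intro j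
  fun_induction pvWhileB limit pre n i j with
  | case1 j h ih => omega
  | case2 j h => omega

theorem pvWhileB_le (limit : Int) (pre : List Int) (n i : Nat) :
    ∀ j, j ≤ n → pvWhileB limit pre n i j ≤ n := by
  intro j
  fun_induction pvWhileB limit pre n i j with
  | case1 j h ih => intro _; exact ih (by have h1 := h.1; omega)
  | case2 j h => intro hj; exact hj

theorem pvWhileB_exit (limit : Int) (pre : List Int) (n i : Nat) :
    ∀ j, j ≤ n → pvWhileB limit pre n i j = n ∨
      ¬ (pre.getD (pvWhileB limit pre n i j + 1) 0 - pre.getD i 0 ≤ limit) := by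
  intro j
  fun_induction pvWhileB limit pre n i j with
  | case1 j h ih => intro _; exact ih (by have h1 := h.1; omega)
  | case2 j h =>
    intro hj
    by_cases hjn : j < n
    · right; intro hc; exact h ⟨hjn, hc⟩
    · left
      have hunf : pvWhileB limit pre n i j = j := by rw [pvWhileB, dif_neg h]
      omega

theorem psum_mono (primes : List Int) (hpos : ∀ p ∈ primes, 1 ≤ p) (a b : Nat) (hab : a ≤ b) :
    (primes.take a).sum ≤ (primes.take b).sum := by
  have : primes.take b = primes.take a ++ (primes.drop a).take (b - a) := by
    rw [← List.take_add]
    congr 1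
    omega
  rw [this, List.sum_append]
  have : 0 ≤ ((primes.drop a).take (b - a)).sum := by
    apply List.sum_nonneg
    intro x hx
    have : x ∈ primes := List.mem_of_mem_drop (List.mem_of_mem_take hx)
    have := hpos x this
    omega
  omega

-- the two outer loops agree, suffix by suffix (for any incoming pointer j)
theorem pvOuter_eq (limit : Int) (primes : List Int) (hpos : ∀ p ∈ primes, 1 ≤ p) :
    ∀ (i : Nat), ∀ (j : Nat) (st : Int × Int), i ≤ primes.length → j ≤ primes.length →
    pvOuterA limit primes (primes.drop i) st =
      pvOuterB limit (PySem.Set.ofList primes) (pvPrefix primes) primes.length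
        (List.range' i (primes.length - i)) j st := by
  intro i
  induction hn : primes.length - i generalizing i with
  | zero =>
    intro j st hle _
    have : i = primes.length := by omega
    subst this
    simp [pvOuterA, pvOuterB, List.drop_length]
  | succ k ih =>
    intro j st hle hjn0
    have hi : i < primes.length := by omega
    obtain ⟨p, rest, hd⟩ : ∃ p rest, primes.drop i = p :: rest := by
      cases hdrop : primes.drop i with
      | nil => exfalso; have := List.drop_eq_nil_iff.mp hdrop; omega
      | cons p rest => exact ⟨p, rest, rfl⟩
    have hrest : rest = primes.drop (i + 1) := by
      have := congrArg List.tail hd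
      simpa [List.tail_drop] using this.symm
    have hr' : List.range' i (k + 1) = i :: List.range' (i + 1) k := List.range'_succ ..
    rw [hd, hr']
    simp only [pvOuterA, pvOuterB]
    set j0 : Nat := if j < i then i else j with hj0
    set jw : Nat := pvWhileB limit (pvPrefix primes) primes.length i j0 with hjw
    have hij0 : i ≤ j0 := by rw [hj0]; split <;> omega
    have hji : i ≤ jw := le_trans hij0 (pvWhileB_ge limit (pvPrefix primes) primes.length i j0)
    have hpre : ∀ m, m ≤ primes.length → (pvPrefix primes).getD m 0 = (primes.take m).sum := by
      intro m hm
      rw [pvPrefix_eq]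
      rw [List.getD_eq_getElem?_getD, List.getElem?_map]
      rw [List.getElem?_range (by omega)]
      simp
    have hdrop_pos : ∀ q ∈ primes.drop i, 1 ≤ q := fun q hq => hpos q (List.mem_of_mem_drop hq)
    -- the while loop's exit bound: every window longer than jw - i has sum > limit
    have hstep : pvInnerA limit primes (p :: rest) 0 0 st.1 st.2
        = pvDownB limit (PySem.Set.ofList primes) (pvPrefix primes) i (jw - i) st := by
      by_cases hjn : jw ≤ primes.length
      · rw [pvDownB_eq limit primes i (jw - i) st (by omega)]
        have hfail : ∀ c, jw - i < c → c ≤ (primes.drop i).length →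
            ¬ ((0 : Int) + ((primes.drop i).take c).sum ≤ limit) := by
          intro c hc1 hc2 hcle
          have hsum : ((primes.drop i).take c).sum = (primes.take (i + c)).sum - (primes.take i).sum := by
            have : primes.take (i + c) = primes.take i ++ (primes.drop i).take c := List.take_add ..
            rw [this, List.sum_append]; ring
          rcases pvWhileB_exit limit (pvPrefix primes) primes.length i j0 (by rw [hj0]; split <;> omega) with hex | hex
          · rw [← hjw] at hex
            have : c ≤ primes.length - i := by simpa using hc2
            omega
          · rw [← hjw] at hex
            apply hex
            rw [hpre _ (by simp at hc2; omega), hpre _ (by omega)]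
            have hmono := psum_mono primes hpos (jw + 1) (i + c) (by omega)
            rw [hsum] at hcle
            omega
        rw [← pvDown_take_eq limit primes (primes.drop i) 0 (jw - i) hfail]
        rw [hd]
        rw [pvInnerA_eq_down limit primes (p :: rest) 0 0 st.1 st.2
          (by intro q hq; exact hdrop_pos q (by rw [hd]; exact hq))]
        cases pvDown limit primes (p :: rest) 0 with
        | none => rfl
        | some kv =>
          obtain ⟨kk, vv⟩ := kv
          simp only [zero_add]
      · exfalso
        exact hjn (pvWhileB_le limit (pvPrefix primes) primes.length i j0 (by rw [hj0]; split <;> omega))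
    rw [hstep, hrest]
    have hjwn : jw ≤ primes.length :=
      pvWhileB_le limit (pvPrefix primes) primes.length i j0 (by rw [hj0]; split <;> omega)
    exact ih (i + 1) (by omega) jw _ (by omega) hjwn

-- ===== VERDICT (by name: the statement is the Claim_ definition above) =====
theorem find_prime_with_most_consecutive_sums_spec : Claim_equal_find_prime_with_most_consecutive_sums := by
  intro limit _
  unfold Spec_find_prime_with_most_consecutive_sums
  unfold find_prime_with_most_consecutive_sums find_prime_with_most_consecutive_sums_alt
  simp only []
  have := pvOuter_eq limit (generate_primes limit) (generate_primes_pos limit) 0 0 (0, 0) (by omega) (by omega)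
  rw [List.drop_zero] at this
  rw [this]
  congr 1
  rw [Nat.sub_zero, List.range_eq_range']
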